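-- pv_equiv track=rewrite | github.com/Filco306/sudokutetris | src/game.py | render_piece
-- ===== SOURCE A (Python) =====
-- from typing import Tuple, List, Union
--
-- def render_piece(piece: Tuple[Tuple[int, int]]) -> str:
--     max_coord_x = max([x[0] for x in piece]) + 1
--     max_coord_y = max([x[1] for x in piece]) + 1
--     s = ""
--     for x in range(max_coord_x):
--         for y in range(max_coord_y):
--             if (x, y) in piece:
--                 s += "#"
--             else:
--                 s += " "
--         s += "\n"
--     return s
-- ===== SOURCE B (Python) =====
-- def render_piece(piece):
--     max_coord_x = max([x[0] for x in piece]) + 1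
--     max_coord_y = max([x[1] for x in piece]) + 1
--     grid = [[" "] * max_coord_y for _ in range(max_coord_x)]
--     for x, y in piece:
--         if 0 <= x and 0 <= y:
--             grid[x][y] = "#"
--     return "".join("".join(row) + "\n" for row in grid)
-- ===== Notes on version B (the rewrite author's own statement) =====
-- stated objective: faster
-- what changed: B fills a 2-D character grid once per coordinate and joins the rows, instead of A's scan of the whole piece for membership at every grid cell.
-- outside the precondition, e.g. on render_piece([]): A raises ValueError, B raises ValueError
import Mathlib
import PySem

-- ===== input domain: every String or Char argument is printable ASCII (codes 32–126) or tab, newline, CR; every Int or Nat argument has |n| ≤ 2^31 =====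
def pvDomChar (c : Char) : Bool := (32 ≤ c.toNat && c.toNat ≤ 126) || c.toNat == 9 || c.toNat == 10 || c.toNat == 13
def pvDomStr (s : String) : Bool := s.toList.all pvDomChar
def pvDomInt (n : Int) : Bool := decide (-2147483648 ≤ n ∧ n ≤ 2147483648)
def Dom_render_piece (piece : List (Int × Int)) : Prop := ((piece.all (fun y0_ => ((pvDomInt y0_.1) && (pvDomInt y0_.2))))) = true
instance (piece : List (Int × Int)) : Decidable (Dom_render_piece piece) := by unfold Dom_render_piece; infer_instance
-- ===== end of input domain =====

-- B renders by filling a 2-D character grid once per coordinate instead of scanning the whole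
-- piece for every grid cell (alternative data-structure decomposition).

-- ===== PORT A =====
def render_piece (piece : List (Int × Int)) : String :=
  let max_coord_x := (PySem.List.max? (piece.map (fun x => x.1)) (fun y => y)).getD 0 + 1
  let max_coord_y := (PySem.List.max? (piece.map (fun x => x.2)) (fun y => y)).getD 0 + 1
  let s : List Char :=
    (PySem.List.pyRange 0 max_coord_x 1).foldl (fun s x =>
      ((PySem.List.pyRange 0 max_coord_y 1).foldl (fun s y =>
        if (x, y) ∈ piece then s ++ ['#'] else s ++ [' ']) s) ++ ['\n']) []
  String.ofList s

-- ===== PORT B =====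
def pvUpd (g : List (List Char)) (p : Int × Int) : List (List Char) :=
  if 0 ≤ p.1 ∧ 0 ≤ p.2 then g.modify p.1.toNat (fun row => row.set p.2.toNat '#') else g

def render_piece_alt (piece : List (Int × Int)) : String :=
  let max_coord_x := (PySem.List.max? (piece.map (fun x => x.1)) (fun y => y)).getD 0 + 1
  let max_coord_y := (PySem.List.max? (piece.map (fun x => x.2)) (fun y => y)).getD 0 + 1
  let grid := piece.foldl pvUpd
      (List.replicate max_coord_x.toNat (List.replicate max_coord_y.toNat ' '))
  String.ofList (grid.flatMap (fun row => row ++ ['\n']))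

-- ===== PRECONDITION & SPEC =====
-- Pre_ excludes only the empty piece, on which A's max([]) raises ValueError (B raises too).
def Pre_render_piece (piece : List (Int × Int)) : Prop := piece ≠ []
instance (piece : List (Int × Int)) : Decidable (Pre_render_piece piece) := by unfold Pre_render_piece; infer_instance
def pvWitness_render_piece : (List (Int × Int)) := [((1:Int), (0:Int)), ((0:Int), (2:Int))]

def Spec_render_piece (piece : List (Int × Int)) (out : String) : Prop := out = render_piece_alt piece
instance (piece : List (Int × Int)) (out : String) : Decidable (Spec_render_piece piece out) := by unfold Spec_render_piece; infer_instance

-- ===== CLAIM (what is proved, stated in full; the proofs are below) =====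
def Claim_equal_render_piece : Prop := ∀ (piece : List (Int × Int)), Dom_render_piece piece → Pre_render_piece piece → Spec_render_piece piece (render_piece piece)

-- ===== LEMMAS AND PROOFS =====

-- shape invariant: the fold preserves the row lengths of the grid
theorem pvFoldl_len (piece : List (Int × Int)) (g : List (List Char)) (i : Nat) :
    ((piece.foldl pvUpd g)[i]?).map List.length = (g[i]?).map List.length := by
  induction piece generalizing g with
  | nil => rfl
  | cons p rest ih =>
      rw [List.foldl_cons, ih]
      unfold pvUpd
      split_ifs
      · rw [List.getElem?_modify]
        cases g[i]? with
        | none => rfl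
        | some r =>
            by_cases h : p.1.toNat = i
            · simp [h]
            · simp [h]
      · rfl

-- cell invariant: after the fold, a cell holds '#' iff its (nonnegative) coordinates are in piece
theorem pvFoldl_cell (piece : List (Int × Int)) (g : List (List Char)) (i j : Nat) :
    ((piece.foldl pvUpd g)[i]?.bind (fun r => r[j]?)) =
      (g[i]?.bind (fun r => r[j]?)).map
        (fun c => if ((i : Int), (j : Int)) ∈ piece then '#' else c) := by
  induction piece generalizing g with
  | nil =>
      simp only [List.foldl_nil, List.not_mem_nil, if_false]
      cases g[i]? with
      | none => rfl
      | some r => cases r[j]? <;> simp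
  | cons p rest ih =>
      rw [List.foldl_cons, ih]
      unfold pvUpd
      by_cases hp : 0 ≤ p.1 ∧ 0 ≤ p.2
      · rw [if_pos hp, List.getElem?_modify]
        by_cases hx : p.1.toNat = i
        · cases hg : g[i]? with
          | none => simp
          | some r =>
              simp only [Option.map_eq_map, Option.map_some, Option.bind_some,
                if_pos hx, List.getElem?_set]
              cases hr : r[j]? with
              | none =>
                  have hj : r.length ≤ j := List.getElem?_eq_none_iff.1 hr
                  split_ifs with h1 h2 <;> first | omega | simp
              | some c =>
                  have hj : j < r.length := (List.getElem?_eq_some_iff.1 hr).1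
                  by_cases hy : p.2.toNat = j
                  · have hmem : ((i : Int), (j : Int)) ∈ p :: rest := by
                      have h1 : p.1 = (i : Int) := by omega
                      have h2 : p.2 = (j : Int) := by omega
                      have : p = ((i : Int), (j : Int)) := Prod.ext h1 h2
                      rw [this]; exact List.mem_cons_self
                    rw [if_pos hy, if_pos (show p.2.toNat < r.length by omega)]
                    simp [hmem]
                  · have hne : ((i : Int), (j : Int)) ≠ p := by
                      intro h; rw [← h] at hy; simp at hy
                    simp only [if_neg hy, List.mem_cons, hne, false_or]
        · have hne : ((i : Int), (j : Int)) ≠ p := by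
            intro h; rw [← h] at hx; simp at hx
          cases g[i]? with
          | none => rfl
          | some r =>
              simp only [Option.map_eq_map, Option.map_some, if_neg hx, Option.bind_some]
              cases r[j]? <;> simp [List.mem_cons, hne]
      · rw [if_neg hp]
        have hne : ((i : Int), (j : Int)) ≠ p := by
          intro h; rw [← h] at hp; exact hp ⟨by simp, by simp⟩
        cases g[i]? with
        | none => rfl
        | some r => cases r[j]? <;> simp [List.mem_cons, hne]

-- the final grid, in closed form
theorem pvGrid_eq (piece : List (Int × Int)) (mxN myN : Nat) :
    piece.foldl pvUpd (List.replicate mxN (List.replicate myN ' ')) =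
      (List.range mxN).map (fun (i : Nat) =>
        (List.range myN).map (fun (j : Nat) =>
          if ((i : Int), (j : Int)) ∈ piece then '#' else ' ')) := by
  apply List.ext_getElem?
  intro i
  by_cases hi : i < mxN
  · have hlen := pvFoldl_len piece (List.replicate mxN (List.replicate myN ' ')) i
    rw [List.getElem?_replicate, if_pos hi] at hlen
    cases hg : (piece.foldl pvUpd (List.replicate mxN (List.replicate myN ' ')))[i]? with
    | none => rw [hg] at hlen; simp at hlen
    | some r =>
        rw [hg] at hlen
        simp only [Option.map_some, Option.some.injEq, List.length_replicate] at hlen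
        have hrow : r = (List.range myN).map (fun (j : Nat) =>
            if ((i : Int), (j : Int)) ∈ piece then '#' else ' ') := by
          apply List.ext_getElem?
          intro j
          by_cases hj : j < myN
          · have hc := pvFoldl_cell piece (List.replicate mxN (List.replicate myN ' ')) i j
            rw [hg, List.getElem?_replicate, if_pos hi] at hc
            simp only [Option.bind_some, List.getElem?_replicate, if_pos hj] at hc
            rw [hc]
            simp [hj]
          · rw [List.getElem?_eq_none_iff.2 (by omega),
              List.getElem?_eq_none_iff.2 (by simp; omega)]
        rw [hrow]
        simp [hi]
  · have hlen := pvFoldl_len piece (List.replicate mxN (List.replicate myN ' ')) i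
    rw [List.getElem?_replicate, if_neg hi] at hlen
    cases hg : (piece.foldl pvUpd (List.replicate mxN (List.replicate myN ' ')))[i]? with
    | none => exact (List.getElem?_eq_none_iff.2 (by simp; omega)).symm
    | some r => rw [hg] at hlen; simp at hlen

-- A's inner loop appends one character per column
theorem pvInner_eq (piece : List (Int × Int)) (my : Int) (x : Int) (s : List Char) :
    (PySem.List.pyRange 0 my 1).foldl (fun s y =>
        if (x, y) ∈ piece then s ++ ['#'] else s ++ [' ']) s =
      s ++ (PySem.List.pyRange 0 my 1).map (fun y => if (x, y) ∈ piece then '#' else ' ') := by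
  have hfun : (fun (s : List Char) (y : Int) =>
      if (x, y) ∈ piece then s ++ ['#'] else s ++ [' ']) =
      (fun s y => s ++ [if (x, y) ∈ piece then '#' else ' ']) := by
    funext s y; split_ifs <;> rfl
  rw [hfun, PySem.List.foldl_append_singleton_eq_map]

-- A's loops, in closed form
theorem pvA_chars (piece : List (Int × Int)) (mx my : Int) :
    (PySem.List.pyRange 0 mx 1).foldl (fun s x =>
        ((PySem.List.pyRange 0 my 1).foldl (fun s y =>
          if (x, y) ∈ piece then s ++ ['#'] else s ++ [' ']) s) ++ ['\n']) [] =
      (PySem.List.pyRange 0 mx 1).flatMap (fun x =>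
        (PySem.List.pyRange 0 my 1).map (fun y => if (x, y) ∈ piece then '#' else ' ') ++ ['\n']) := by
  have hfun : (fun (s : List Char) (x : Int) =>
      ((PySem.List.pyRange 0 my 1).foldl (fun s y =>
        if (x, y) ∈ piece then s ++ ['#'] else s ++ [' ']) s) ++ ['\n']) =
      (fun s x => s ++ ((PySem.List.pyRange 0 my 1).map
        (fun y => if (x, y) ∈ piece then '#' else ' ') ++ ['\n'])) := by
    funext s x
    rw [pvInner_eq, List.append_assoc]
  rw [hfun, PySem.List.foldl_append_eq_flatMap, List.nil_append]

-- ===== VERDICT (by name: the statement is the Claim_ definition above) =====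
theorem render_piece_spec : Claim_equal_render_piece := by
  intro piece _ _
  unfold Spec_render_piece render_piece render_piece_alt
  simp only
  rw [pvA_chars, pvGrid_eq]
  congr 1
  simp only [PySem.List.pyRange_one, Int.sub_zero, zero_add, List.flatMap_map,
    List.map_map, Function.comp_def]
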